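-- pv_equiv track=rewrite | github.com/Akamdar46/poker | backend/advanced_engine.py | _analyze_board_texture
-- ===== SOURCE A (Python) =====
-- from typing import List, Tuple, Dict, Optional, Any
-- from collections import defaultdict, Counter
--
-- def _analyze_board_texture(community_cards: List[str]) -> str:
--     """Analyze board texture (dry, wet, coordinated)."""
--     if len(community_cards) < 3:
--         return "preflop"
--
--     # Extract suits and ranks
--     suits = [card[-1] for card in community_cards]
--     ranks = [card[:-1] for card in community_cards]
--
--     # Count suits and ranks
--     suit_counts = Counter(suits)
--     rank_counts = Counter(ranks)
--
--     # Check for flush draws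
--     max_suit_count = max(suit_counts.values()) if suit_counts else 0
--
--     # Check for straight possibilities
--     rank_values = {'A': 14, 'K': 13, 'Q': 12, 'J': 11, 'T': 10}
--     for i, rank in enumerate(['9', '8', '7', '6', '5', '4', '3', '2']):
--         rank_values[rank] = 9 - i
--
--     numeric_ranks = sorted([rank_values.get(rank, 0) for rank in ranks])
--
--     # Check for straight draws
--     has_straight_draw = False
--     for i in range(len(numeric_ranks) - 1):
--         if numeric_ranks[i+1] - numeric_ranks[i] <= 2:
--             has_straight_draw = True
--             break
--
--     # Determine texture
--     if max_suit_count >= 3 or has_straight_draw: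
--         return "wet"
--     elif len(set(ranks)) == len(ranks) and max_suit_count <= 2:
--         return "dry"
--     else:
--         return "coordinated"
-- ===== SOURCE B (Python) =====
-- def _analyze_board_texture(community_cards):
--     """Analyze board texture (dry, wet, coordinated)."""
--     if len(community_cards) < 3:
--         return "preflop"
--
--     rank_values = {'A': 14, 'K': 13, 'Q': 12, 'J': 11, 'T': 10,
--                    '9': 9, '8': 8, '7': 7, '6': 6, '5': 5, '4': 4, '3': 3, '2': 2}
--
--     # Single pass over the cards: suit counts, a rank-value histogram, duplicate-rank flag.
--     suit_counts = {}
--     buckets = [0] * 17          # rank values are 0 or 2..14; two slack cells for the window below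
--     seen_ranks = set()
--     ranks_distinct = True
--     for card in community_cards:
--         suit = card[-1]
--         rank = card[:-1]
--         suit_counts[suit] = suit_counts.get(suit, 0) + 1
--         buckets[rank_values.get(rank, 0)] += 1
--         if rank in seen_ranks:
--             ranks_distinct = False
--         else:
--             seen_ranks.add(rank)
--
--     max_suit_count = max(suit_counts.values())
--
--     # straight draw: two cards whose rank values differ by at most 2
--     has_straight_draw = any(
--         buckets[v] >= 2 or (buckets[v] >= 1 and (buckets[v + 1] >= 1 or buckets[v + 2] >= 1))
--         for v in range(15))
--
--     if max_suit_count >= 3 or has_straight_draw: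
--         return "wet"
--     if ranks_distinct and max_suit_count <= 2:
--         return "dry"
--     return "coordinated"
-- ===== Notes on version B (the rewrite author's own statement) =====
-- stated objective: alternative
-- what changed: B makes one pass over the cards with three accumulators (incremental suit-count dict, a 17-cell rank-value histogram, a seen-set duplicate flag) instead of A's staged map/Counter passes, and detects a straight draw by a windowed scan of the histogram (a bucket with count>=2, or a populated bucket with a populated bucket at distance 1 or 2) instead of sorting the ranks and scanning adjacent gaps.
import Mathlib
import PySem

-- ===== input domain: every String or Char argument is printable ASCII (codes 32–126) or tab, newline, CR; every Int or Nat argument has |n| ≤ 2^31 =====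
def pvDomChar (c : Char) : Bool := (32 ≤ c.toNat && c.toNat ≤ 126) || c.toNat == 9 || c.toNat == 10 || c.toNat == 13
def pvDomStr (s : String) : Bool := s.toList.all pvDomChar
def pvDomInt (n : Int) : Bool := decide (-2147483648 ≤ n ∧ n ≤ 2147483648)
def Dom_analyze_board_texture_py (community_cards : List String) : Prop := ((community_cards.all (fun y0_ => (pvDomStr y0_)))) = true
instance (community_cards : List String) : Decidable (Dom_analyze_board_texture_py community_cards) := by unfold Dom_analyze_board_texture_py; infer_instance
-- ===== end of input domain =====

-- B replaces A's staged passes (map suits/ranks, Counter, sort-then-adjacent-gap scan) by a single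
-- pass over the cards maintaining a suit-count dict, a rank-value histogram and a duplicate flag,
-- detecting the straight draw by a windowed scan of the histogram; objective: alternative, same results.

-- ===== PORT A =====
-- rank_values = {'A':14,…,'T':10}; for i, rank in enumerate(['9',…,'2']): rank_values[rank] = 9 - i
def pvRankValuesA : PySem.Dict String Int :=
  (PySem.List.enumerate ["9", "8", "7", "6", "5", "4", "3", "2"] 0).foldl
    (fun d p => d.insert p.2 (9 - p.1))
    (((((PySem.Dict.empty.insert "A" 14).insert "K" 13).insert "Q" 12).insert "J" 11).insert "T" 10)

def analyze_board_texture_py (community_cards : List String) : String :=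
  if community_cards.length < 3 then "preflop" else
  let suits := community_cards.map (fun card => (PySem.Str.pyGet? card (-1)).getD ' ')
  let ranks := community_cards.map (fun card => PySem.Str.slice card none (some (-1)))
  let suit_counts := PySem.Dict.counter suits
  let _rank_counts := PySem.Dict.counter ranks   -- computed by A, never used (kept for fidelity)
  let max_suit_count : Int :=
    match PySem.List.max? suit_counts.values (fun v => v) with
    | some m => m
    | none => 0
  let numeric_ranks :=
    PySem.List.sorted (ranks.map (fun rank => pvRankValuesA.getD rank 0)) (fun x => x) false
  let has_straight_draw :=
    (PySem.List.pyRange 0 ((numeric_ranks.length : Int) - 1) 1).any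
      (fun i => decide (PySem.List.pyGetD numeric_ranks (i + 1) 0
                        - PySem.List.pyGetD numeric_ranks i 0 ≤ 2))
  if 3 ≤ max_suit_count ∨ has_straight_draw = true then "wet"
  else if (PySem.Set.ofList ranks).length = ranks.length ∧ max_suit_count ≤ 2 then "dry"
  else "coordinated"

-- ===== PORT B =====
def pvRankValuesB : PySem.Dict String Int :=
  PySem.Dict.ofList [("A", 14), ("K", 13), ("Q", 12), ("J", 11), ("T", 10),
                     ("9", 9), ("8", 8), ("7", 7), ("6", 6), ("5", 5), ("4", 4), ("3", 3), ("2", 2)]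

-- the loop body of B's single pass: state = (suit_counts, buckets, seen_ranks, ranks_distinct)
def pvStepB (st : PySem.Dict Char Int × List Int × PySem.Set String × Bool) (card : String) :
    PySem.Dict Char Int × List Int × PySem.Set String × Bool :=
  let suit := (PySem.Str.pyGet? card (-1)).getD ' '
  let rank := PySem.Str.slice card none (some (-1))
  let d := st.1.insert suit (st.1.getD suit 0 + 1)
  -- buckets[rank_values.get(rank, 0)] += 1 : the index is one of 0, 2..14, hence a plain
  -- in-range non-negative list index (no wraparound); .toNat is exact here
  let idx := (pvRankValuesB.getD rank 0).toNat
  let bl := st.2.1.set idx (st.2.1.getD idx 0 + 1)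
  if PySem.Set.contains st.2.2.1 rank = true then (d, bl, st.2.2.1, false)
  else (d, bl, PySem.Set.add st.2.2.1 rank, st.2.2.2)

def analyze_board_texture_py_alt (community_cards : List String) : String :=
  if community_cards.length < 3 then "preflop" else
  let st := community_cards.foldl pvStepB
    (PySem.Dict.empty, List.replicate 17 (0 : Int), PySem.Set.empty, true)
  -- max(suit_counts.values()): the dict is nonempty here (≥ 3 cards), so Python's max returns;
  -- the 0 default of getD is unreachable
  let max_suit_count : Int := (PySem.List.max? st.1.values (fun v => v)).getD 0
  let buckets := st.2.1
  let has_straight_draw :=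
    (PySem.List.pyRange 0 15 1).any (fun v =>
      decide (2 ≤ PySem.List.pyGetD buckets v 0) ||
      (decide (1 ≤ PySem.List.pyGetD buckets v 0) &&
        (decide (1 ≤ PySem.List.pyGetD buckets (v + 1) 0) ||
         decide (1 ≤ PySem.List.pyGetD buckets (v + 2) 0))))
  if 3 ≤ max_suit_count ∨ has_straight_draw = true then "wet"
  else if st.2.2.2 = true ∧ max_suit_count ≤ 2 then "dry"
  else "coordinated"

-- ===== PRECONDITION & SPEC =====
-- Pre_ excludes only the inputs where Python A raises: a board of ≥ 3 cards containing an
-- empty string (card[-1] is an IndexError there); B raises identically.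
def Pre_analyze_board_texture_py (community_cards : List String) : Prop :=
  community_cards.length < 3 ∨ ∀ c ∈ community_cards, c ≠ ""
instance (community_cards : List String) : Decidable (Pre_analyze_board_texture_py community_cards) := by unfold Pre_analyze_board_texture_py; infer_instance
def pvWitness_analyze_board_texture_py : List String := ["Ah", "Kd", "2c"]

def Spec_analyze_board_texture_py (community_cards : List String) (out : String) : Prop := out = analyze_board_texture_py_alt community_cards
instance (community_cards : List String) (out : String) : Decidable (Spec_analyze_board_texture_py community_cards out) := by unfold Spec_analyze_board_texture_py; infer_instance

-- ===== CLAIM (what is proved, stated in full; the proofs are below) =====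
def Claim_equal_analyze_board_texture_py : Prop := ∀ (community_cards : List String), Dom_analyze_board_texture_py community_cards → Pre_analyze_board_texture_py community_cards → Spec_analyze_board_texture_py community_cards (analyze_board_texture_py community_cards)

-- ===== LEMMAS AND PROOFS =====

def pvSuit (card : String) : Char := (PySem.Str.pyGet? card (-1)).getD ' '
def pvRank (card : String) : String := PySem.Str.slice card none (some (-1))
def pvNum (card : String) : Int := pvRankValuesB.getD (pvRank card) 0

theorem pvRankValues_eq : pvRankValuesA = pvRankValuesB := by decide

theorem pvRankValuesB_bounds (r : String) :
    pvRankValuesB.getD r 0 = 0 ∨ (2 ≤ pvRankValuesB.getD r 0 ∧ pvRankValuesB.getD r 0 ≤ 14) := by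
  cases hg : pvRankValuesB.get? r with
  | none => left; simp [PySem.Dict.getD_eq_get?_getD, hg]
  | some v =>
    have hm := PySem.Dict.mem_items_of_get?_eq_some pvRankValuesB hg
    have hv : pvRankValuesB.getD r 0 = v := by simp [PySem.Dict.getD_eq_get?_getD, hg]
    rw [hv]
    have h : pvRankValuesB.items = [("A", (14:Int)), ("K", 13), ("Q", 12), ("J", 11), ("T", 10),
      ("9", 9), ("8", 8), ("7", 7), ("6", 6), ("5", 5), ("4", 4), ("3", 3), ("2", 2)] := by rfl
    rw [h] at hm
    simp only [List.mem_cons, List.not_mem_nil, or_false, Prod.mk.injEq] at hm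
    right
    rcases hm with ⟨_,h⟩|⟨_,h⟩|⟨_,h⟩|⟨_,h⟩|⟨_,h⟩|⟨_,h⟩|⟨_,h⟩|⟨_,h⟩|⟨_,h⟩|⟨_,h⟩|⟨_,h⟩|⟨_,h⟩|⟨_,h⟩ <;> omega

-- B's single fold is componentwise three independent folds
theorem pvFold_split (cards : List String) (d : PySem.Dict Char Int) (bl : List Int)
    (seen : PySem.Set String) (dist : Bool) :
    cards.foldl pvStepB (d, bl, seen, dist) =
      ((cards.map pvSuit).foldl (fun d s => d.insert s (d.getD s 0 + 1)) d,
       (cards.map pvNum).foldl (fun b x => b.set x.toNat (b.getD x.toNat 0 + 1)) bl,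
       (cards.map pvRank).foldl
         (fun sd r => if PySem.Set.contains sd.1 r = true then (sd.1, false)
                      else (PySem.Set.add sd.1 r, sd.2)) (seen, dist)) := by
  induction cards generalizing d bl seen dist with
  | nil => rfl
  | cons c t ih =>
    simp only [List.map_cons, List.foldl_cons, pvStepB, pvSuit, pvRank, pvNum]
    split_ifs <;> simp [ih]

-- the histogram fold counts occurrences
theorem pvHist_length (l : List Int) (bl : List Int) :
    (l.foldl (fun b x => b.set x.toNat (b.getD x.toNat 0 + 1)) bl).length = bl.length := by
  induction l generalizing bl with
  | nil => rfl
  | cons x t ih => rw [List.foldl_cons, ih]; simp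

theorem pvHist_getD (l : List Int) (hb : ∀ x ∈ l, 0 ≤ x) (bl : List Int) (k : Nat)
    (hk : k < bl.length) (hkl : ∀ x ∈ l, x.toNat < bl.length) :
    (l.foldl (fun b x => b.set x.toNat (b.getD x.toNat 0 + 1)) bl).getD k 0
      = bl.getD k 0 + (l.count (k : Int) : Int) := by
  induction l generalizing bl with
  | nil => simp
  | cons x t ih =>
    rw [List.foldl_cons]
    have hx0 : 0 ≤ x := hb x (by simp)
    have hxl : x.toNat < bl.length := hkl x (by simp)
    have hlen : (bl.set x.toNat (bl.getD x.toNat 0 + 1)).length = bl.length := by simp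
    rw [ih (fun y hy => hb y (by simp [hy])) _ (by omega)
      (fun y hy => by rw [hlen]; exact hkl y (by simp [hy]))]
    rw [List.count_cons]
    rw [List.getD_eq_getElem _ _ (by omega), List.getD_eq_getElem _ _ hk, List.getElem_set]
    by_cases hxk : x.toNat = k
    · have hxk' : x = (k : Int) := by omega
      simp only [hxk', beq_self_eq_true, if_true, Int.toNat_natCast, List.getD_eq_getElem _ _ hk]
      push_cast
      omega
    · have hxk' : ¬ x = (k : Int) := by omega
      rw [if_neg hxk, if_neg (by simpa using hxk')]
      push_cast
      omega

-- the seen-set fold: final flag is true iff the ranks are distinct (and none was pre-seen)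
theorem pvDist_fold (rs : List String) (seen : PySem.Set String) (dist : Bool) :
    (rs.foldl (fun sd r => if PySem.Set.contains sd.1 r = true then (sd.1, false)
                           else (PySem.Set.add sd.1 r, sd.2)) (seen, dist)).2 = true
      ↔ dist = true ∧ rs.Nodup ∧ ∀ r ∈ rs, r ∉ seen := by
  induction rs generalizing seen dist with
  | nil => simp
  | cons r t ih =>
    rw [List.foldl_cons]
    by_cases h : PySem.Set.contains seen r = true
    · rw [if_pos h, ih]
      have hr : r ∈ seen := (PySem.Set.contains_iff seen r).mp h
      simp only [Bool.false_eq_true, false_and, List.nodup_cons]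
      constructor
      · intro h'; exact absurd h' (by simp)
      · rintro ⟨-, -, hall⟩; exact absurd hr (hall r (by simp))
    · rw [if_neg h, ih]
      have hr : r ∉ seen := fun hm => h ((PySem.Set.contains_iff seen r).mpr hm)
      simp only [List.nodup_cons, PySem.Set.mem_add]
      constructor
      · rintro ⟨hd, hnd, hall⟩
        refine ⟨hd, ⟨fun hrt => ?_, hnd⟩, fun x hx => ?_⟩
        · rcases hall r hrt with h'
          simp at h'
        · intro hxs
          rcases List.mem_cons.mp hx with rfl | hx'
          · exact hr hxs
          · exact hall x hx' (Or.inl hxs)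
      · rintro ⟨hd, ⟨hrt, hnd⟩, hall⟩
        refine ⟨hd, hnd, fun x hx => ?_⟩
        rintro (hxs | rfl)
        · exact hall x (by simp [hx]) hxs
        · exact hrt hx

-- len(set(xs)) == len(xs) iff xs has no duplicates
theorem pv_ofList_len_lt (xs : List String) (h : ¬ xs.Nodup) :
    (PySem.Set.ofList xs).length < xs.length := by
  induction xs with
  | nil => simp at h
  | cons x t ih =>
    rw [PySem.Set.ofList_cons]
    simp only [List.nodup_cons, not_and_or, not_not] at h
    rcases h with hx | hnd
    · have hxm : x ∈ PySem.Set.ofList t := (PySem.Set.mem_ofList t x).mpr hx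
      have : ((PySem.Set.ofList t).discard x).length < (PySem.Set.ofList t).length := by
        unfold PySem.Set.discard
        refine List.length_filter_lt_length_iff_exists.mpr ?_
        exact ⟨x, hxm, by simp⟩
      have hle := PySem.Set.length_ofList_le t
      simp only [List.length_cons]
      omega
    · have : ((PySem.Set.ofList t).discard x).length ≤ (PySem.Set.ofList t).length := by
        unfold PySem.Set.discard
        exact List.length_filter_le _ _
      have := ih hnd
      simp only [List.length_cons]
      omega

theorem pv_ofList_len_iff (xs : List String) :
    (PySem.Set.ofList xs).length = xs.length ↔ xs.Nodup := by
  constructor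
  · intro h
    by_contra hn
    exact absurd h (Nat.ne_of_lt (pv_ofList_len_lt xs hn))
  · intro h; rw [PySem.Set.ofList_eq_self_of_nodup xs h]

-- "some pair of elements at distance ≤ 2" in three equivalent forms
theorem pvClose_iff (l : List Int) :
    (¬ l.Pairwise (fun a b => ¬ |a - b| ≤ 2)) ↔
      ((∃ a, a ∈ l ∧ 2 ≤ l.count a) ∨ ∃ a ∈ l, ∃ b ∈ l, a < b ∧ b ≤ a + 2) := by
  constructor
  · intro h
    rw [List.pairwise_iff_getElem] at h
    push Not at h
    obtain ⟨i, j, hi, hj, hij, hle⟩ := h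
    by_cases heq : l[i] = l[j]
    · left
      refine ⟨l[i], List.getElem_mem _, ?_⟩
      rw [← List.duplicate_iff_two_le_count, List.duplicate_iff_exists_distinct_get]
      exact ⟨⟨i, hi⟩, ⟨j, hj⟩, by simpa using hij, by simp, by simp [heq]⟩
    · right
      rcases lt_or_gt_of_ne heq with hlt | hgt
      · exact ⟨l[i], List.getElem_mem _, l[j], List.getElem_mem _, hlt, by
          rw [abs_sub_comm, abs_of_nonneg (by omega)] at hle; omega⟩
      · exact ⟨l[j], List.getElem_mem _, l[i], List.getElem_mem _, hgt, by
          rw [abs_of_nonneg (by omega)] at hle; omega⟩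
  · rintro (⟨a, ha, hcnt⟩ | ⟨a, ha, b, hb, hab, hle⟩) <;> intro hp
    · have hsub : (List.replicate 2 a).Sublist l := List.replicate_sublist_iff.mpr hcnt
      have := hp.sublist hsub
      simp [List.replicate, List.pairwise_cons] at this
    · have hsym : Symmetric (fun a b : Int => ¬ |a - b| ≤ 2) := by
        intro u v h; rw [abs_sub_comm]; exact h
      exact (hp.forall hsym ha hb (by omega)) (by rw [abs_of_nonpos (by omega)]; omega)

-- transfer of A's scan from the sorted list back to the unsorted one
theorem pvScanA_aux (l s : List Int) (hperm : s.Perm l)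
    (hmono : ∀ (p q : Nat) (hpq : p ≤ q) (hq : q < s.length),
      s[p]'(Nat.lt_of_le_of_lt hpq hq) ≤ s[q]) :
    ((PySem.List.pyRange 0 ((s.length : Int) - 1) 1).any
      (fun i => decide (PySem.List.pyGetD s (i + 1) 0 - PySem.List.pyGetD s i 0 ≤ 2))) = true
    ↔ ¬ l.Pairwise (fun a b => ¬ |a - b| ≤ 2) := by
  have hsym : ∀ {a b : Int}, (¬ |a - b| ≤ 2) → ¬ |b - a| ≤ 2 := by
    intro a b h hab; rw [abs_sub_comm] at hab; exact h hab
  simp only [List.any_eq_true, PySem.List.mem_pyRange_one, decide_eq_true_eq]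
  constructor
  · rintro ⟨i, ⟨hi0, hi⟩, hgap⟩
    have hiN : i.toNat + 1 < s.length := by omega
    rw [PySem.List.pyGetD_eq_getElem s 0 (by omega) (by omega),
        PySem.List.pyGetD_eq_getElem s 0 hi0 (by omega)] at hgap
    have hcast : (i + 1).toNat = i.toNat + 1 := by omega
    simp only [hcast] at hgap
    have hpair : ¬ s.Pairwise (fun a b => ¬ |a - b| ≤ 2) := by
      rw [List.pairwise_iff_getElem]
      push Not
      refine ⟨i.toNat, i.toNat + 1, by omega, hiN, by omega, ?_⟩
      have hm : s[i.toNat] ≤ s[i.toNat + 1] := hmono i.toNat (i.toNat + 1) (by omega) hiN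
      rw [abs_sub_comm, abs_of_nonneg (by omega)]
      omega
    intro h
    exact hpair ((hperm.pairwise_iff hsym).mpr h)
  · intro hpl
    have hpair : ¬ s.Pairwise (fun a b => ¬ |a - b| ≤ 2) := by
      intro h
      exact hpl ((hperm.pairwise_iff hsym).mp h)
    rw [List.pairwise_iff_getElem] at hpair
    push Not at hpair
    obtain ⟨p, q, hp, hq, hpq, hclose⟩ := hpair
    have h1 : s[p]'(by omega) ≤ s[p + 1]'(by omega) := hmono p (p + 1) (by omega) (by omega)
    have h2 : s[p + 1]'(by omega) ≤ s[q] := hmono (p + 1) q (by omega) hq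
    rw [abs_sub_comm, abs_of_nonneg (by omega)] at hclose
    refine ⟨(p : Int), ⟨by omega, by omega⟩, ?_⟩
    rw [PySem.List.pyGetD_eq_getElem s 0 (by omega) (by omega),
        PySem.List.pyGetD_eq_getElem s 0 (by omega) (by omega)]
    have hcast : ((p : Int) + 1).toNat = p + 1 := by omega
    simp only [hcast, Int.toNat_natCast]
    omega

-- A's adjacent-gap scan over the sorted list detects a close pair
theorem pvScanA_iff (l : List Int) :
    ((PySem.List.pyRange 0 (((PySem.List.sorted l (fun x => x) false).length : Int) - 1) 1).any
      (fun i => decide (PySem.List.pyGetD (PySem.List.sorted l (fun x => x) false) (i + 1) 0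
                        - PySem.List.pyGetD (PySem.List.sorted l (fun x => x) false) i 0 ≤ 2))) = true
    ↔ ¬ l.Pairwise (fun a b => ¬ |a - b| ≤ 2) :=
  pvScanA_aux l _ (PySem.List.sorted_perm l (fun x => x) false)
    (fun _ _ hpq hq => PySem.List.sorted_id_getElem_mono l hpq hq)

-- B's windowed scan of the counts detects a close pair
theorem pvScanB_iff (l : List Int) (hb : ∀ x ∈ l, 0 ≤ x ∧ x ≤ 14) :
    ((PySem.List.pyRange 0 15 1).any (fun v =>
      decide (2 ≤ (l.count v : Int)) ||
      (decide (1 ≤ (l.count v : Int)) &&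
        (decide (1 ≤ (l.count (v + 1) : Int)) || decide (1 ≤ (l.count (v + 2) : Int)))))) = true
    ↔ ((∃ a, a ∈ l ∧ 2 ≤ l.count a) ∨ ∃ a ∈ l, ∃ b ∈ l, a < b ∧ b ≤ a + 2) := by
  simp only [List.any_eq_true, PySem.List.mem_pyRange_one, Bool.or_eq_true, Bool.and_eq_true,
    decide_eq_true_eq]
  constructor
  · rintro ⟨v, ⟨hv0, hv15⟩, h2 | ⟨h1, hnext⟩⟩
    · exact Or.inl ⟨v, List.count_pos_iff.mp (by omega), by omega⟩
    · have hvm : v ∈ l := List.count_pos_iff.mp (by omega)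
      rcases hnext with hn1 | hn2
      · exact Or.inr ⟨v, hvm, v + 1, List.count_pos_iff.mp (by omega), by omega, by omega⟩
      · exact Or.inr ⟨v, hvm, v + 2, List.count_pos_iff.mp (by omega), by omega, by omega⟩
  · rintro (⟨a, ha, hcnt⟩ | ⟨a, ha, b, hbm, hab, hle⟩)
    · obtain ⟨h0, h14⟩ := hb a ha
      exact ⟨a, ⟨h0, by omega⟩, Or.inl (by omega)⟩
    · obtain ⟨h0, h14⟩ := hb a ha
      have h1 : 1 ≤ (l.count a : Int) := by
        have := List.count_pos_iff.mpr ha; omega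
      have hbcnt : 1 ≤ (l.count b : Int) := by
        have := List.count_pos_iff.mpr hbm; omega
      refine ⟨a, ⟨h0, by omega⟩, Or.inr ⟨h1, ?_⟩⟩
      rcases (by omega : b = a + 1 ∨ b = a + 2) with rfl | rfl
      · exact Or.inl hbcnt
      · exact Or.inr hbcnt

-- ===== VERDICT (by name: the statement is the Claim_ definition above) =====
theorem analyze_board_texture_py_spec : Claim_equal_analyze_board_texture_py := by
  intro cards _ _
  unfold Spec_analyze_board_texture_py analyze_board_texture_py analyze_board_texture_py_alt
  by_cases h : cards.length < 3
  · simp [h]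
  · simp only [h, if_false]
    rw [pvFold_split]
    -- name the shared data
    have hranks : cards.map (fun card => PySem.Str.slice card none (some (-1))) = cards.map pvRank := rfl
    have hsuits : cards.map (fun card => (PySem.Str.pyGet? card (-1)).getD ' ') = cards.map pvSuit := rfl
    have hnums : cards.map pvNum
        = (cards.map pvRank).map (fun r => pvRankValuesB.getD r 0) := by
      rw [List.map_map]; rfl
    rw [hranks, hsuits, hnums, pvRankValues_eq, PySem.Dict.foldl_insert_getD_add_one_eq_counter]
    have hopt : ∀ o : Option Int, (match o with | some m => m | none => 0) = o.getD 0 := by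
      intro o; cases o <;> rfl
    rw [hopt]
    set ranks := cards.map pvRank with hrk
    set l := ranks.map (fun r => pvRankValuesB.getD r 0) with hldef
    have hbounds : ∀ x ∈ l, 0 ≤ x ∧ x ≤ 14 := by
      intro x hx
      rw [hldef, List.mem_map] at hx
      obtain ⟨r, -, rfl⟩ := hx
      rcases pvRankValuesB_bounds r with h' | h' <;> omega
    set bks := l.foldl (fun b x => b.set x.toNat (b.getD x.toNat 0 + 1))
      (List.replicate 17 (0 : Int)) with hbk
    have hlen17 : bks.length = 17 := by
      rw [hbk, pvHist_length]; simp
    have hget : ∀ w : Int, 0 ≤ w → w < 17 → PySem.List.pyGetD bks w 0 = (l.count w : Int) := by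
      intro w h0 h17
      rw [PySem.List.pyGetD_eq_getElem bks 0 h0 (by rw [hlen17]; exact_mod_cast h17),
          ← List.getD_eq_getElem bks 0 (by omega), hbk,
          pvHist_getD l (fun x hx => (hbounds x hx).1) _ w.toNat (by simp; omega)
            (fun x hx => by have := hbounds x hx; simp; omega)]
      have : (List.replicate 17 (0 : Int)).getD w.toNat 0 = 0 := by
        rw [List.getD_eq_getElem _ _ (by simp; omega), List.getElem_replicate]
      rw [this, Int.toNat_of_nonneg h0]
      ring
    have hBscan : ((PySem.List.pyRange 0 15 1).any (fun v =>
        decide (2 ≤ PySem.List.pyGetD bks v 0) ||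
        (decide (1 ≤ PySem.List.pyGetD bks v 0) &&
          (decide (1 ≤ PySem.List.pyGetD bks (v + 1) 0) ||
           decide (1 ≤ PySem.List.pyGetD bks (v + 2) 0)))))
      = ((PySem.List.pyRange 0 15 1).any (fun v =>
        decide (2 ≤ (l.count v : Int)) ||
        (decide (1 ≤ (l.count v : Int)) &&
          (decide (1 ≤ (l.count (v + 1) : Int)) || decide (1 ≤ (l.count (v + 2) : Int)))))) := by
      refine PySem.List.any_congr_mem ?_
      intro v hv
      rw [PySem.List.mem_pyRange_one] at hv
      rw [hget v (by omega) (by omega), hget (v + 1) (by omega) (by omega),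
          hget (v + 2) (by omega) (by omega)]
    have hscan : ((PySem.List.pyRange 0 ((((PySem.List.sorted l (fun x => x) false)).length : Int) - 1) 1).any
        (fun i => decide (PySem.List.pyGetD (PySem.List.sorted l (fun x => x) false) (i + 1) 0
                          - PySem.List.pyGetD (PySem.List.sorted l (fun x => x) false) i 0 ≤ 2)) = true)
        ↔ ((PySem.List.pyRange 0 15 1).any (fun v =>
        decide (2 ≤ PySem.List.pyGetD bks v 0) ||
        (decide (1 ≤ PySem.List.pyGetD bks v 0) &&
          (decide (1 ≤ PySem.List.pyGetD bks (v + 1) 0) ||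
           decide (1 ≤ PySem.List.pyGetD bks (v + 2) 0)))) = true) := by
      rw [hBscan]
      exact (pvScanA_iff l).trans ((pvClose_iff l).trans (pvScanB_iff l hbounds).symm)
    have hflag : ((ranks.foldl (fun sd r => if PySem.Set.contains sd.1 r = true then (sd.1, false)
                           else (PySem.Set.add sd.1 r, sd.2)) (PySem.Set.empty, true)).2 = true)
        ↔ ranks.Nodup := by
      rw [pvDist_fold]
      simp [PySem.Set.empty]
    apply if_congr (or_congr Iff.rfl hscan) rfl
    apply if_congr (and_congr ((pv_ofList_len_iff ranks).trans hflag.symm) Iff.rfl) rfl rfl
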